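-- pv_equiv track=rewrite | github.com/SavageCooPigeonX/keystroke-telemetry | _tmp_token_optimizer.py | _find_glyph
-- ===== SOURCE A (Python) =====
-- def _find_glyph(name: str, keymap: dict[str, str]) -> str:
--     """Find the glyph for a module name, checking parent prefixes."""
--     if name in keymap:
--         return keymap[name]
--     # Check if this is a child module — try stripping suffixes
--     # e.g. "self_fix_seq013_scan_hardcoded" -> try "self_fix"
--     parts = name.split('_seq')
--     if len(parts) > 1:
--         parent = parts[0]
--         if parent in keymap:
--             return keymap[parent]
--     # Try longest prefix match
--     sorted_keys = sorted(keymap.keys(), key=len, reverse=True)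
--     for key in sorted_keys:
--         if name.startswith(key + '_') or name == key:
--             return keymap[key]
--     return ''
-- ===== SOURCE B (Python) =====
-- def _find_glyph(name: str, keymap: dict[str, str]) -> str:
--     """Find the glyph for a module name, checking parent prefixes."""
--     # Parent check first: a '_seq' split whose parent is a key wins
--     # (but an exact key always beats it, handled by the scan below,
--     # where the exact key is necessarily the unique longest match).
--     if name not in keymap:
--         parts = name.split('_seq')
--         if len(parts) > 1 and parts[0] in keymap:
--             return keymap[parts[0]]
--     # One pass over the dict tracking the longest matching key; an exact
--     # match of name itself is the longest possible match, so this single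
--     # scan subsumes A's separate exact-lookup stage.
--     best = None
--     for key, glyph in keymap.items():
--         if (name == key or name.startswith(key + '_')) and \
--            (best is None or len(key) > len(best[0])):
--             best = (key, glyph)
--     return best[1] if best is not None else ''
-- ===== Notes on version B (the rewrite author's own statement) =====
-- stated objective: simpler
-- what changed: B drops A's separate exact-lookup stage (an exact key is necessarily the unique longest matching key, so the prefix scan subsumes it), reorders the '_seq' parent check to run only when no exact key exists, and replaces A's sort-all-keys-by-length-then-scan with a single pass tracking the longest matching key (strict '>' preserves the first-in-order tie-break of the stable sort).
import Mathlib
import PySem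

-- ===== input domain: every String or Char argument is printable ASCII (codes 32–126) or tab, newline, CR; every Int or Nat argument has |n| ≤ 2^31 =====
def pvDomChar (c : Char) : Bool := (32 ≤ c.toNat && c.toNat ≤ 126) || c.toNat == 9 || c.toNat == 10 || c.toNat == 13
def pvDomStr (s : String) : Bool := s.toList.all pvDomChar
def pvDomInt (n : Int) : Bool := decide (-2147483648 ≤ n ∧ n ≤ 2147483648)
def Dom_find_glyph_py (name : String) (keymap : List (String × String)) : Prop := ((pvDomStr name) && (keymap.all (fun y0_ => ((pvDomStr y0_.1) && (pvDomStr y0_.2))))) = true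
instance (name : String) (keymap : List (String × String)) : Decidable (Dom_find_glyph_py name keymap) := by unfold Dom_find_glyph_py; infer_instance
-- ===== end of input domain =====

-- B merges A's exact-lookup stage into a single longest-match pass over the dict
-- (the exact key is the unique longest match) and drops the sort (objective: simpler).

-- ===== PORT A =====
def find_glyph_py (name : String) (keymap : List (String × String)) : String :=
  match (PySem.Dict.mk keymap).get? name with
  | some v => v
  | none =>
    match (if ((PySem.Str.split? name "_seq").getD []).length > 1
           then (PySem.Dict.mk keymap).get? (((PySem.Str.split? name "_seq").getD []).headD "")
           else none) with
    | some v => v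
    | none =>
      match (PySem.List.sorted ((PySem.Dict.mk keymap).keys) (fun key => PySem.Str.len key) true).find?
              (fun key => PySem.Str.startswith name (key ++ "_") || name == key) with
      | some key => ((PySem.Dict.mk keymap).get? key).getD ""
      | none => ""

-- ===== PORT B =====
def find_glyph_py_alt (name : String) (keymap : List (String × String)) : String :=
  match (if ((PySem.Dict.mk keymap).get? name).isNone then
           (if ((PySem.Str.split? name "_seq").getD []).length > 1
            then (PySem.Dict.mk keymap).get? (((PySem.Str.split? name "_seq").getD []).headD "")
            else none)
         else none) with
  | some v => v
  | none =>
    match (PySem.Dict.mk keymap).items.foldl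
            (fun best p =>
              if (name == p.1 || PySem.Str.startswith name (p.1 ++ "_")) &&
                 (match best with
                  | none => true
                  | some q => decide (PySem.Str.len q.1 < PySem.Str.len p.1))
              then some p else best)
            (none : Option (String × String)) with
    | some q => q.2
    | none => ""

-- ===== PRECONDITION & SPEC =====
def Spec_find_glyph_py (name : String) (keymap : List (String × String)) (out : String) : Prop := out = find_glyph_py_alt name keymap
instance (name : String) (keymap : List (String × String)) (out : String) : Decidable (Spec_find_glyph_py name keymap out) := by unfold Spec_find_glyph_py; infer_instance

-- ===== CLAIM (what is proved, stated in full; the proofs are below) =====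
def Claim_equal_find_glyph_py : Prop := ∀ (name : String) (keymap : List (String × String)), Dom_find_glyph_py name keymap → Spec_find_glyph_py name keymap (find_glyph_py name keymap)

-- ===== LEMMAS AND PROOFS =====

-- the matching test both stage-3 loops use (B's operand order)
def pvM (name k : String) : Bool := name == k || PySem.Str.startswith name (k ++ "_")

-- B's loop body, named for the proofs (definitionally the lambda in find_glyph_py_alt)
def pvStep (name : String) (best : Option (String × String)) (p : String × String) : Option (String × String) :=
  if (name == p.1 || PySem.Str.startswith name (p.1 ++ "_")) &&
     (match best with
      | none => true
      | some q => decide (PySem.Str.len q.1 < PySem.Str.len p.1))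
  then some p else best

lemma pvM_prefix {name k : String} (h : pvM name k = true) : k.toList <+: name.toList := by
  unfold pvM at h
  rcases Bool.or_eq_true_iff.mp h with h | h
  · rw [beq_iff_eq] at h; rw [h]
  · rw [PySem.Str.startswith_eq, PySem.Chars.startswith_iff, String.toList_append] at h
    exact (List.prefix_append _ _).trans h

lemma pvM_len_le {name k : String} (h : pvM name k = true) :
    PySem.Str.len k ≤ PySem.Str.len name := by
  rw [PySem.Str.len_eq, PySem.Str.len_eq]
  exact_mod_cast (pvM_prefix h).length_le

lemma pvM_len_unique {name k1 k2 : String} (h1 : pvM name k1 = true) (h2 : pvM name k2 = true)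
    (hlen : PySem.Str.len k1 = PySem.Str.len k2) : k1 = k2 := by
  have p1 := List.prefix_iff_eq_take.mp (pvM_prefix h1)
  have p2 := List.prefix_iff_eq_take.mp (pvM_prefix h2)
  have hl : k1.toList.length = k2.toList.length := by
    simpa [PySem.Str.len_eq] using hlen
  have : k1.toList = k2.toList := by rw [p1, p2, hl]
  exact String.toList_inj.mp this

lemma pvM_self (name : String) : pvM name name = true := by
  unfold pvM; simp

lemma pv_find?_len_max {p : String → Bool} {k : String} :
    ∀ {l : List String}, l.Pairwise (fun a b => PySem.Str.len b ≤ PySem.Str.len a) →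
      l.find? p = some k → ∀ x ∈ l, p x = true → PySem.Str.len x ≤ PySem.Str.len k := by
  intro l
  induction l with
  | nil => intro _ h; simp at h
  | cons a t ih =>
    intro hpw hf x hx hpx
    rw [List.pairwise_cons] at hpw
    rw [List.find?_cons] at hf
    by_cases hpa : p a = true
    · simp [hpa] at hf
      rcases List.mem_cons.mp hx with rfl | hxt
      · rw [hf]
      · exact hf ▸ hpw.1 x hxt
    · simp [hpa] at hf
      rcases List.mem_cons.mp hx with rfl | hxt
      · exact absurd hpx hpa
      · exact ih hpw.2 hf x hxt hpx

lemma pv_get?_mk_eq_find? (pairs : List (String × String)) (x : String) :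
    (PySem.Dict.mk pairs).get? x = (pairs.find? (fun p => p.1 == x)).map (fun p => p.2) := by
  induction pairs with
  | nil => simp [PySem.Dict.get?]
  | cons p t ih =>
    cases p with
    | mk a b =>
      rw [PySem.Dict.get?_mk_cons, List.find?_cons]
      by_cases h : (a == x) = true
      · simp [h]
      · simp [h, ih]

lemma pvStep_none (name : String) (p : String × String) :
    pvStep name none p = if pvM name p.1 = true then some p else none := by
  unfold pvStep pvM
  simp

lemma pvStep_some (name : String) (q p : String × String) :
    pvStep name (some q) p =
      if (pvM name p.1 && decide (PySem.Str.len q.1 < PySem.Str.len p.1)) = true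
      then some p else some q := by
  unfold pvStep pvM
  rfl

lemma pv_foldl_none (name : String) :
    ∀ (t : List (String × String)),
      (∀ p ∈ t, pvM name p.1 = false) → t.foldl (pvStep name) none = none := by
  intro t
  induction t with
  | nil => intro _; rfl
  | cons p rest ih =>
    intro h
    rw [List.foldl_cons, pvStep_none, if_neg (by simp [h p (List.mem_cons_self ..)])]
    exact ih (fun q hq => h q (List.mem_cons_of_mem _ hq))

lemma pv_foldl_keep (name : String) (q : String × String) :
    ∀ (t : List (String × String)),
      (∀ p ∈ t, pvM name p.1 = true → PySem.Str.len p.1 ≤ PySem.Str.len q.1) →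
      t.foldl (pvStep name) (some q) = some q := by
  intro t
  induction t with
  | nil => intro _; rfl
  | cons p rest ih =>
    intro h
    have hcond : (pvM name p.1 && decide (PySem.Str.len q.1 < PySem.Str.len p.1)) = false := by
      by_cases hm : pvM name p.1 = true
      · have hd : decide (PySem.Str.len q.1 < PySem.Str.len p.1) = false :=
          decide_eq_false (not_lt.mpr (h p (List.mem_cons_self ..) hm))
        rw [hm, hd]; rfl
      · rw [Bool.not_eq_true] at hm
        rw [hm]; rfl
    rw [List.foldl_cons, pvStep_some, if_neg (by rw [hcond]; exact Bool.false_ne_true)]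
    exact ih (fun r hr => h r (List.mem_cons_of_mem _ hr))

lemma pv_foldl_find (name k : String) (hmk : pvM name k = true) :
    ∀ (t : List (String × String)) (acc : Option (String × String)),
      (∀ p ∈ t, pvM name p.1 = true → PySem.Str.len p.1 ≤ PySem.Str.len k) →
      (∀ p ∈ t, pvM name p.1 = true → PySem.Str.len p.1 = PySem.Str.len k → p.1 = k) →
      (acc = none ∨ ∃ q, acc = some q ∧ PySem.Str.len q.1 < PySem.Str.len k) →
      (∃ p ∈ t, p.1 = k) →
      t.foldl (pvStep name) acc = t.find? (fun p => p.1 == k) := by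
  intro t
  induction t with
  | nil => intro acc _ _ _ hex; simp at hex
  | cons p rest ih =>
    intro acc hmax huniq hacc hex
    rw [List.foldl_cons]
    by_cases hpk : p.1 = k
    · have hbeq : ((fun r : String × String => r.1 == k) p) = true := beq_iff_eq.mpr hpk
      rw [List.find?_cons_of_pos (p := fun r : String × String => r.1 == k) hbeq]
      have hm : pvM name p.1 = true := by rw [hpk]; exact hmk
      have hstep : pvStep name acc p = some p := by
        rcases hacc with rfl | ⟨q, rfl, hqlt⟩
        · rw [pvStep_none, if_pos hm]
        · have hd : decide (PySem.Str.len q.1 < PySem.Str.len p.1) = true :=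
            decide_eq_true (by rw [hpk]; exact hqlt)
          rw [pvStep_some, if_pos (by rw [hm, hd]; rfl)]
      rw [hstep]
      exact pv_foldl_keep name p rest
        (fun r hr hmr => by rw [hpk]; exact hmax r (List.mem_cons_of_mem _ hr) hmr)
    · have hbeq : ¬ ((fun r : String × String => r.1 == k) p) = true := by simp [hpk]
      rw [List.find?_cons_of_neg (p := fun r : String × String => r.1 == k) hbeq]
      have hex' : ∃ r ∈ rest, r.1 = k := by
        rcases hex with ⟨r, hr, hrk⟩
        rcases List.mem_cons.mp hr with rfl | hrt
        · exact absurd hrk hpk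
        · exact ⟨r, hrt, hrk⟩
      have hlt_of_match : pvM name p.1 = true → PySem.Str.len p.1 < PySem.Str.len k := by
        intro hm
        rcases lt_or_eq_of_le (hmax p (List.mem_cons_self ..) hm) with hlt | heq
        · exact hlt
        · exact absurd (huniq p (List.mem_cons_self ..) hm heq) hpk
      have hacc' : pvStep name acc p = none ∨
          ∃ q, pvStep name acc p = some q ∧ PySem.Str.len q.1 < PySem.Str.len k := by
        rcases hacc with rfl | ⟨q, rfl, hqlt⟩
        · rw [pvStep_none]
          by_cases hm : pvM name p.1 = true
          · exact Or.inr ⟨p, by rw [if_pos hm], hlt_of_match hm⟩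
          · rw [Bool.not_eq_true] at hm
            rw [hm]; exact Or.inl (by rfl)
        · rw [pvStep_some]
          right
          by_cases hc : (pvM name p.1 && decide (PySem.Str.len q.1 < PySem.Str.len p.1)) = true
          · exact ⟨p, by rw [if_pos hc], hlt_of_match (Bool.and_eq_true_iff.mp hc).1⟩
          · exact ⟨q, by rw [if_neg hc], hqlt⟩
      exact ih (pvStep name acc p)
        (fun r hr => hmax r (List.mem_cons_of_mem _ hr))
        (fun r hr => huniq r (List.mem_cons_of_mem _ hr))
        hacc' hex'

-- when name itself is a key, B's single pass returns exactly the dict's value for name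
lemma pv_fold_exact (name : String) (keymap : List (String × String)) (v : String)
    (h : (PySem.Dict.mk keymap).get? name = some v) :
    (match (PySem.Dict.mk keymap).items.foldl
            (fun best p =>
              if (name == p.1 || PySem.Str.startswith name (p.1 ++ "_")) &&
                 (match best with
                  | none => true
                  | some q => decide (PySem.Str.len q.1 < PySem.Str.len p.1))
              then some p else best)
            (none : Option (String × String)) with
     | some q => q.2
     | none => "") = v := by
  show (match keymap.foldl (pvStep name) (none : Option (String × String)) with
        | some q => q.2
        | none => "") = v
  rw [pv_get?_mk_eq_find?] at h
  obtain ⟨q, hfind, hq2⟩ := Option.map_eq_some_iff.mp h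
  have hqk : q.1 = name := by
    have h' : (q.1 == name) = true := by simpa using List.find?_some hfind
    exact beq_iff_eq.mp h'
  have hmem : q ∈ keymap := List.mem_of_find?_eq_some hfind
  rw [pv_foldl_find name name (pvM_self name) keymap none
        (fun p _ hm => pvM_len_le hm)
        (fun p _ hm hlen => pvM_len_unique hm (pvM_self name) hlen)
        (Or.inl rfl) ⟨q, hmem, hqk⟩,
      hfind]
  exact hq2

lemma pv_stage3 (name : String) (keymap : List (String × String)) :
    (match (PySem.List.sorted ((PySem.Dict.mk keymap).keys) (fun key => PySem.Str.len key) true).find?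
              (fun key => PySem.Str.startswith name (key ++ "_") || name == key) with
     | some key => ((PySem.Dict.mk keymap).get? key).getD ""
     | none => "")
    =
    (match (PySem.Dict.mk keymap).items.foldl
              (fun best p =>
                if (name == p.1 || PySem.Str.startswith name (p.1 ++ "_")) &&
                   (match best with
                    | none => true
                    | some q => decide (PySem.Str.len q.1 < PySem.Str.len p.1))
                then some p else best)
              (none : Option (String × String)) with
     | some q => q.2
     | none => "") := by
  show _ = (match keymap.foldl (pvStep name) (none : Option (String × String)) with
            | some q => q.2
            | none => "")
  have hkeys : (PySem.Dict.mk keymap).keys = keymap.map (fun p => p.1) := rfl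
  have hconv : ∀ x, (PySem.Str.startswith name (x ++ "_") || name == x) = pvM name x := by
    intro x; unfold pvM; exact Bool.or_comm _ _
  cases hF : (PySem.List.sorted ((PySem.Dict.mk keymap).keys) (fun key => PySem.Str.len key) true).find?
      (fun key => PySem.Str.startswith name (key ++ "_") || name == key) with
  | none =>
    have hnone := List.find?_eq_none.mp hF
    have hall : ∀ p ∈ keymap, pvM name p.1 = false := by
      intro p hp
      have hm : p.1 ∈ PySem.List.sorted ((PySem.Dict.mk keymap).keys) (fun key => PySem.Str.len key) true := by
        rw [PySem.List.mem_sorted, hkeys]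
        exact List.mem_map.mpr ⟨p, hp, rfl⟩
      have := hnone _ hm
      rw [hconv] at this
      exact Bool.not_eq_true _ ▸ this
    rw [pv_foldl_none name keymap hall]
  | some k =>
    have hpk := List.find?_some hF
    have hmk : pvM name k = true := by rw [← hconv]; exact hpk
    have hkmem : k ∈ keymap.map (fun p => p.1) := by
      have := List.mem_of_find?_eq_some hF
      rw [PySem.List.mem_sorted, hkeys] at this
      exact this
    obtain ⟨p0, hp0, hp0k⟩ := List.mem_map.mp hkmem
    have hmax : ∀ p ∈ keymap, pvM name p.1 = true → PySem.Str.len p.1 ≤ PySem.Str.len k := by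
      intro p hp hm
      have hmem : p.1 ∈ PySem.List.sorted ((PySem.Dict.mk keymap).keys) (fun key => PySem.Str.len key) true := by
        rw [PySem.List.mem_sorted, hkeys]
        exact List.mem_map.mpr ⟨p, hp, rfl⟩
      exact pv_find?_len_max (PySem.List.sorted_pairwise_rev _ _) hF p.1 hmem (by rw [hconv]; exact hm)
    have huniq : ∀ p ∈ keymap, pvM name p.1 = true → PySem.Str.len p.1 = PySem.Str.len k → p.1 = k :=
      fun p _ hm hlen => pvM_len_unique hm hmk hlen
    rw [pv_foldl_find name k hmk keymap none hmax huniq (Or.inl rfl) ⟨p0, hp0, hp0k⟩]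
    show ((PySem.Dict.mk keymap).get? k).getD "" = _
    rw [pv_get?_mk_eq_find? keymap k]
    obtain ⟨q, hq⟩ : ∃ q, keymap.find? (fun p => p.1 == k) = some q := by
      have : (keymap.find? (fun p => p.1 == k)).isSome :=
        List.find?_isSome.mpr ⟨p0, hp0, beq_iff_eq.mpr hp0k⟩
      exact Option.isSome_iff_exists.mp this
    rw [hq]
    rfl

-- ===== VERDICT (by name: the statement is the Claim_ definition above) =====
theorem find_glyph_py_spec : Claim_equal_find_glyph_py := by
  intro name keymap _
  unfold Spec_find_glyph_py
  simp only [find_glyph_py, find_glyph_py_alt]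
  cases h1 : (PySem.Dict.mk keymap).get? name with
  | some v =>
    simp only [Option.isNone_some, Bool.false_eq_true, if_false]
    exact (pv_fold_exact name keymap v h1).symm
  | none =>
    simp only [Option.isNone_none, if_true]
    cases h2 : (if ((PySem.Str.split? name "_seq").getD []).length > 1
                then (PySem.Dict.mk keymap).get? (((PySem.Str.split? name "_seq").getD []).headD "")
                else none) with
    | some v => rfl
    | none => exact pv_stage3 name keymap
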